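-- pv_equiv track=rewrite | github.com/ivan-dankovsky/homework | 25.01.2019_prime/16.py | flm
-- ===== SOURCE A (Python) =====
-- def flm(seq):
-- 	length = len(seq)
-- 	result = -1
--
-- 	for i in range(length-6):
-- 		for j in range(i+6, length):
-- 			if seq[i] % 2 == 0 or seq[j] % 2 == 0:
-- 				if seq[i] * seq[j] > result:
-- 					result = seq[i] * seq[j]
--
-- 	return result
-- ===== SOURCE B (Python) =====
-- def flm(seq):
--     result = -1
--     mx = mn = mxe = mne = None  # prefix max/min of all values, and of even values
--     for j in range(6, len(seq)):
--         x = seq[j - 6]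
--         mx = x if mx is None else max(mx, x)
--         mn = x if mn is None else min(mn, x)
--         if x % 2 == 0:
--             mxe = x if mxe is None else max(mxe, x)
--             mne = x if mne is None else min(mne, x)
--         y = seq[j]
--         if y % 2 == 0:
--             result = max(result, y * mx, y * mn)
--         elif mxe is not None:
--             result = max(result, y * mxe, y * mne)
--     return result
-- ===== Notes on version B (the rewrite author's own statement) =====
-- stated objective: faster
-- what changed: Replaced A's quadratic scan over all index pairs (i, j) with j >= i+6 by a single left-to-right pass that maintains the running max/min of the prefix values and of the even prefix values, so each position's best partner is found in O(1) via sign handling.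
import Mathlib
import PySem

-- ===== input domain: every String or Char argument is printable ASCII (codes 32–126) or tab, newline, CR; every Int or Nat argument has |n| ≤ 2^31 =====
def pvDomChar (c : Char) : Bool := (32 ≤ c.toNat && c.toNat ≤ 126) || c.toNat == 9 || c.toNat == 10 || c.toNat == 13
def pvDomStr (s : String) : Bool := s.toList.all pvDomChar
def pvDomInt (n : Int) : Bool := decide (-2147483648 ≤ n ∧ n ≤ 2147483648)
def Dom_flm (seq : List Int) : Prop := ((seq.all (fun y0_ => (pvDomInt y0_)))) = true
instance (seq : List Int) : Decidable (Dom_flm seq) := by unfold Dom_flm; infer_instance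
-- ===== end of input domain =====

-- B replaces A's quadratic scan over all distant pairs by a single pass that keeps
-- running prefix max/min of all values and of even values (sign handling via min/max).

-- ===== PORT A =====
-- Literal port of A's nested loops; pyGetD is exact here: every index produced by the
-- ranges is in range.
def flm (seq : List Int) : Int :=
  let length : Int := (seq.length : Int)
  (PySem.List.pyRange 0 (length - 6) 1).foldl (fun result i =>
    (PySem.List.pyRange (i + 6) length 1).foldl (fun result j =>
      if PySem.Int.mod (PySem.List.pyGetD seq i 0) 2 = 0 ∨
         PySem.Int.mod (PySem.List.pyGetD seq j 0) 2 = 0 then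
        if PySem.List.pyGetD seq i 0 * PySem.List.pyGetD seq j 0 > result then
          PySem.List.pyGetD seq i 0 * PySem.List.pyGetD seq j 0
        else result
      else result) result) (-1)

-- ===== PORT B =====
-- State mirrors Source B's (result, mx, mn, mxe, mne); `None` becomes `none`.
-- Source B's `elif mxe is not None` is rendered as the match on (mxe, mne): in Source B mxe and
-- mne are None simultaneously, so matching both is the same test.
def flm_alt (seq : List Int) : Int :=
  ((PySem.List.pyRange 6 (seq.length : Int) 1).foldl
    (fun (st : Int × Option Int × Option Int × Option Int × Option Int) j =>
      let x := PySem.List.pyGetD seq (j - 6) 0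
      let mx : Int := match st.2.1 with | none => x | some v => max v x
      let mn : Int := match st.2.2.1 with | none => x | some v => min v x
      let mxe : Option Int :=
        if PySem.Int.mod x 2 = 0 then
          some (match st.2.2.2.1 with | none => x | some v => max v x)
        else st.2.2.2.1
      let mne : Option Int :=
        if PySem.Int.mod x 2 = 0 then
          some (match st.2.2.2.2 with | none => x | some v => min v x)
        else st.2.2.2.2
      let y := PySem.List.pyGetD seq j 0
      let result : Int :=
        if PySem.Int.mod y 2 = 0 then max (max st.1 (y * mx)) (y * mn)
        else match mxe, mne with
          | some v, some w => max (max st.1 (y * v)) (y * w)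
          | _, _ => st.1
      (result, some mx, some mn, mxe, mne))
    ((-1 : Int), (none : Option Int), (none : Option Int), (none : Option Int), (none : Option Int))).1

-- ===== PRECONDITION & SPEC =====
def Spec_flm (seq : List Int) (out : Int) : Prop := out = flm_alt seq
instance (seq : List Int) (out : Int) : Decidable (Spec_flm seq out) := by unfold Spec_flm; infer_instance

-- ===== CLAIM (what is proved, stated in full; the proofs are below) =====
def Claim_equal_flm : Prop := ∀ (seq : List Int), Dom_flm seq → Spec_flm seq (flm seq)

-- ===== LEMMAS AND PROOFS =====

-- seq[i] for an in-range index, as a total function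
def gd (seq : List Int) (i : Nat) : Int := seq.getD i 0

-- the pair (i, j) is admissible and satisfies the evenness condition
def Cond (seq : List Int) (i j : Nat) : Prop := gd seq i % 2 = 0 ∨ gd seq j % 2 = 0

-- p is the product of some admissible pair
def Good (seq : List Int) (p : Int) : Prop :=
  ∃ i j : Nat, i + 6 ≤ j ∧ j < seq.length ∧ Cond seq i j ∧ p = gd seq i * gd seq j

-- full characterisation of the answer
def CharAll (seq : List Int) (r : Int) : Prop :=
  -1 ≤ r ∧ (r = -1 ∨ Good seq r) ∧ ∀ p, Good seq p → p ≤ r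

lemma charAll_unique (seq : List Int) (r r' : Int)
    (h : CharAll seq r) (h' : CharAll seq r') : r = r' := by
  obtain ⟨h1, h2, h3⟩ := h
  obtain ⟨h1', h2', h3'⟩ := h'
  have hle : r ≤ r' := by
    rcases h2 with rfl | hg
    · exact h1'
    · exact h3' _ hg
  have hle' : r' ≤ r := by
    rcases h2' with rfl | hg
    · exact h1
    · exact h3 _ hg
  omega

-- generic foldl lemmas for monotone accumulating steps
lemma foldl_mono_of {α : Type} (F : Int → α → Int) (h : ∀ r a, r ≤ F r a)
    (l : List α) (r : Int) : r ≤ l.foldl F r := by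
  induction l generalizing r with
  | nil => exact le_refl _
  | cons a t ih => exact le_trans (h r a) (ih _)

lemma foldl_ub_of {α : Type} (F : Int → α → Int) (h : ∀ r a, r ≤ F r a)
    (l : List α) (r : Int) (a : α) (ha : a ∈ l) (t : Int) (ht : ∀ r, t ≤ F r a) :
    t ≤ l.foldl F r := by
  induction l generalizing r with
  | nil => cases ha
  | cons b tl ih =>
    rcases List.mem_cons.mp ha with rfl | hmem
    · exact le_trans (ht r) (foldl_mono_of F h tl _)
    · exact ih _ hmem

lemma mul_le_max_of_between (x y lo hi : Int) (h1 : lo ≤ x) (h2 : x ≤ hi) :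
    x * y ≤ max (y * hi) (y * lo) := by
  rcases le_total 0 y with hy | hy
  · exact le_max_of_le_left (by nlinarith)
  · exact le_max_of_le_right (by nlinarith)

-- membership in a prefix gives an index
lemma mem_take_index (seq : List Int) (m : Nat) (v : Int) (hv : v ∈ seq.take m) :
    ∃ i : Nat, i < m ∧ i < seq.length ∧ gd seq i = v := by
  obtain ⟨i, hi, hget⟩ := List.mem_iff_getElem.mp hv
  have hlen : i < min m seq.length := by simpa using hi
  refine ⟨i, by omega, by omega, ?_⟩
  have : (seq.take m)[i] = seq[i]'(by omega) := List.getElem_take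
  rw [this] at hget
  simp [gd, List.getD_eq_getElem?_getD, List.getElem?_eq_getElem (by omega : i < seq.length), hget]

lemma gd_mem_take (seq : List Int) (m i : Nat) (hi : i < m) (hilen : i < seq.length) :
    gd seq i ∈ seq.take m := by
  have : gd seq i = (seq.take m)[i]'(by simp; omega) := by
    simp [gd, List.getD_eq_getElem?_getD, List.getElem?_eq_getElem hilen, List.getElem_take]
  rw [this]
  exact List.getElem_mem _

-- membership-restricted shape lemma
lemma foldl_shape_mem {α : Type} (F : Int → α → Int) (P : Int → Prop)
    (l : List α) (h : ∀ r, ∀ a ∈ l, F r a = r ∨ P (F r a))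
    (r : Int) : l.foldl F r = r ∨ P (l.foldl F r) := by
  induction l generalizing r with
  | nil => exact Or.inl rfl
  | cons a t ih =>
    rcases ih (fun r b hb => h r b (List.mem_cons_of_mem a hb)) (F r a) with he | hp
    · simp only [List.foldl_cons] at *
      rw [he]; exact h r a (List.mem_cons_self)
    · exact Or.inr hp

-- ---------- A-side ----------

lemma pymod2 (z : Int) : PySem.Int.mod z 2 = z % 2 :=
  PySem.Int.mod_eq_emod_of_pos (by norm_num)

lemma pyGetD_gd (seq : List Int) (i : Int) (h0 : 0 ≤ i) :
    PySem.List.pyGetD seq i 0 = gd seq i.toNat := by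
  rw [← Int.toNat_of_nonneg h0, PySem.List.pyGetD_natCast]
  rfl

-- A's inner-loop body and outer-loop body, exactly as in the port
def stepAI (seq : List Int) (i : Int) (result : Int) (j : Int) : Int :=
  if PySem.Int.mod (PySem.List.pyGetD seq i 0) 2 = 0 ∨
     PySem.Int.mod (PySem.List.pyGetD seq j 0) 2 = 0 then
    if PySem.List.pyGetD seq i 0 * PySem.List.pyGetD seq j 0 > result then
      PySem.List.pyGetD seq i 0 * PySem.List.pyGetD seq j 0
    else result
  else result

def FA (seq : List Int) (result : Int) (i : Int) : Int :=
  (PySem.List.pyRange (i + 6) (seq.length : Int) 1).foldl (stepAI seq i) result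

lemma flm_eq_FA (seq : List Int) :
    flm seq = (PySem.List.pyRange 0 ((seq.length : Int) - 6) 1).foldl (FA seq) (-1) := rfl

lemma stepAI_mono (seq : List Int) (i : Int) : ∀ r j, r ≤ stepAI seq i r j := by
  intro r j
  unfold stepAI
  split_ifs <;> omega

lemma FA_mono (seq : List Int) : ∀ r i, r ≤ FA seq r i := by
  intro r i
  exact foldl_mono_of _ (stepAI_mono seq i) _ _

lemma stepAI_good (seq : List Int) (i j : Int)
    (hi0 : 0 ≤ i) (hij : i + 6 ≤ j) (hjn : j < (seq.length : Int)) :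
    ∀ r, stepAI seq i r j = r ∨ Good seq (stepAI seq i r j) := by
  intro r
  unfold stepAI
  rw [pymod2, pymod2, pyGetD_gd seq i hi0, pyGetD_gd seq j (by omega)]
  split_ifs with hc hgt
  · right
    exact ⟨i.toNat, j.toNat, by omega, by omega, hc, rfl⟩
  · left; rfl
  · left; rfl

lemma flm_charAll (seq : List Int) : CharAll seq (flm seq) := by
  rw [flm_eq_FA]
  refine ⟨foldl_mono_of _ (FA_mono seq) _ _, ?_, ?_⟩
  · apply foldl_shape_mem _ (Good seq)
    intro r i hi
    obtain ⟨hi0, hitop⟩ := (PySem.List.mem_pyRange_one).mp hi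
    apply foldl_shape_mem _ (Good seq)
    intro r' j hj
    obtain ⟨hj0, hjtop⟩ := (PySem.List.mem_pyRange_one).mp hj
    exact stepAI_good seq i j hi0 hj0 hjtop r'
  · rintro p ⟨i, j, hij, hjn, hc, rfl⟩
    apply foldl_ub_of (FA seq) (FA_mono seq) _ _ ((i : Int)) ?_ _ ?_
    · exact (PySem.List.mem_pyRange_one).mpr ⟨by omega, by omega⟩
    · intro r
      apply foldl_ub_of (stepAI seq i) (stepAI_mono seq i) _ _ ((j : Int)) ?_ _ ?_
      · exact (PySem.List.mem_pyRange_one).mpr ⟨by omega, by omega⟩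
      · intro r'
        unfold stepAI
        rw [pymod2, pymod2, pyGetD_gd seq i (by omega), pyGetD_gd seq j (by omega)]
        simp only [Int.toNat_natCast]
        rw [if_pos (show gd seq i % 2 = 0 ∨ gd seq j % 2 = 0 from hc)]
        split_ifs <;> omega

-- ---------- B-side ----------

def evens (P : List Int) : List Int := P.filter (fun x => x % 2 == 0)

def StB : Type := Int × Option Int × Option Int × Option Int × Option Int

def stepB (seq : List Int) (st : StB) (k : Nat) : StB :=
  let x := gd seq k
  let mx : Int := match st.2.1 with | none => x | some v => max v x
  let mn : Int := match st.2.2.1 with | none => x | some v => min v x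
  let mxe : Option Int :=
    if x % 2 = 0 then some (match st.2.2.2.1 with | none => x | some v => max v x)
    else st.2.2.2.1
  let mne : Option Int :=
    if x % 2 = 0 then some (match st.2.2.2.2 with | none => x | some v => min v x)
    else st.2.2.2.2
  let y := gd seq (k + 6)
  let result : Int :=
    if y % 2 = 0 then max (max st.1 (y * mx)) (y * mn)
    else match mxe, mne with
      | some v, some w => max (max st.1 (y * v)) (y * w)
      | _, _ => st.1
  (result, some mx, some mn, mxe, mne)

def SB (seq : List Int) (m : Nat) : StB :=
  (List.range m).foldl (stepB seq) ((-1 : Int), none, none, none, none)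

def IsMaxOf (o : Option Int) (P : List Int) : Prop :=
  match o with
  | none => P = []
  | some v => v ∈ P ∧ ∀ x ∈ P, x ≤ v

def IsMinOf (o : Option Int) (P : List Int) : Prop :=
  match o with
  | none => P = []
  | some v => v ∈ P ∧ ∀ x ∈ P, v ≤ x

def InvB (seq : List Int) (m : Nat) : Prop :=
  let st := SB seq m
  IsMaxOf st.2.1 (seq.take m) ∧
  IsMinOf st.2.2.1 (seq.take m) ∧
  IsMaxOf st.2.2.2.1 (evens (seq.take m)) ∧
  IsMinOf st.2.2.2.2 (evens (seq.take m)) ∧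
  -1 ≤ st.1 ∧ (st.1 = -1 ∨ Good seq st.1) ∧
  ∀ i j : Nat, i + 6 ≤ j → j < m + 6 → j < seq.length → Cond seq i j →
    gd seq i * gd seq j ≤ st.1

lemma gd_eq_getElem (seq : List Int) (m : Nat) (hm : m < seq.length) :
    gd seq m = seq[m] := by
  simp [gd, List.getD_eq_getElem?_getD, List.getElem?_eq_getElem hm]

lemma take_succ_gd (seq : List Int) (m : Nat) (hm : m < seq.length) :
    seq.take (m + 1) = seq.take m ++ [gd seq m] := by
  rw [List.take_add_one, List.getElem?_eq_getElem hm, gd_eq_getElem seq m hm]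
  rfl

lemma evens_snoc (P : List Int) (x : Int) :
    evens (P ++ [x]) = if x % 2 = 0 then evens P ++ [x] else evens P := by
  simp only [evens, List.filter_append]
  by_cases h : x % 2 = 0 <;> simp [h]

lemma mem_evens (P : List Int) (v : Int) : v ∈ evens P ↔ v ∈ P ∧ v % 2 = 0 := by
  simp [evens]

def bump (o : Option Int) (x : Int) : Int := match o with | none => x | some v => max v x
def dip (o : Option Int) (x : Int) : Int := match o with | none => x | some v => min v x

lemma isMaxOf_snoc (o : Option Int) (P : List Int) (x : Int) (h : IsMaxOf o P) :
    IsMaxOf (some (bump o x)) (P ++ [x]) := by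
  unfold bump
  cases o with
  | none =>
    have hP : P = [] := h
    subst hP
    refine ⟨by simp, ?_⟩
    intro z hz
    simp at hz
    subst hz
    exact le_refl _
  | some v =>
    obtain ⟨hvmem, hub⟩ := h
    constructor
    · rcases le_total v x with hvx | hxv
      · simp [max_eq_right hvx]
      · exact List.mem_append_left _ (by simpa [max_eq_left hxv] using hvmem)
    · intro z hz
      rcases List.mem_append.mp hz with hz | hz
      · exact le_trans (hub z hz) (le_max_left _ _)
      · simp at hz; subst hz; exact le_max_right _ _

lemma isMinOf_snoc (o : Option Int) (P : List Int) (x : Int) (h : IsMinOf o P) :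
    IsMinOf (some (dip o x)) (P ++ [x]) := by
  unfold dip
  cases o with
  | none =>
    have hP : P = [] := h
    subst hP
    refine ⟨by simp, ?_⟩
    intro z hz
    simp at hz
    subst hz
    exact le_refl _
  | some v =>
    obtain ⟨hvmem, hlb⟩ := h
    constructor
    · rcases le_total v x with hvx | hxv
      · exact List.mem_append_left _ (by simpa [min_eq_left hvx] using hvmem)
      · simp [min_eq_right hxv]
    · intro z hz
      rcases List.mem_append.mp hz with hz | hz
      · exact le_trans (min_le_left _ _) (hlb z hz)
      · simp at hz; subst hz; exact min_le_right _ _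

lemma good_of_mem_prefix (seq : List Int) (m : Nat) (v : Int) (hm : m + 6 < seq.length)
    (hv : v ∈ seq.take (m + 1)) (hc : v % 2 = 0 ∨ gd seq (m + 6) % 2 = 0) :
    Good seq (gd seq (m + 6) * v) := by
  obtain ⟨i0, hi0m, hi0len, hgd⟩ := mem_take_index seq (m + 1) v hv
  refine ⟨i0, m + 6, by omega, hm, ?_, by rw [hgd, mul_comm]⟩
  unfold Cond
  rw [hgd]
  tauto

-- how the result field evolves over one iteration, given correct trackers for take (m+1)
lemma res_update (seq : List Int) (m : Nat) (hjlen : m + 6 < seq.length)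
    (res : Int) (hres1 : -1 ≤ res) (hres2 : res = -1 ∨ Good seq res)
    (hres3 : ∀ i j : Nat, i + 6 ≤ j → j < m + 6 → j < seq.length → Cond seq i j →
      gd seq i * gd seq j ≤ res)
    (mx mn : Int)
    (hmx : IsMaxOf (some mx) (seq.take (m + 1))) (hmn : IsMinOf (some mn) (seq.take (m + 1)))
    (mxe mne : Option Int)
    (hmxe : IsMaxOf mxe (evens (seq.take (m + 1))))
    (hmne : IsMinOf mne (evens (seq.take (m + 1))))
    (res' : Int)
    (hdef : res' = if gd seq (m + 6) % 2 = 0 then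
        max (max res (gd seq (m + 6) * mx)) (gd seq (m + 6) * mn)
      else match mxe, mne with
        | some v, some w => max (max res (gd seq (m + 6) * v)) (gd seq (m + 6) * w)
        | _, _ => res) :
    -1 ≤ res' ∧ (res' = -1 ∨ Good seq res') ∧
      ∀ i j : Nat, i + 6 ≤ j → j < (m + 1) + 6 → j < seq.length → Cond seq i j →
        gd seq i * gd seq j ≤ res' := by
  by_cases hy : gd seq (m + 6) % 2 = 0
  · rw [if_pos hy] at hdef
    refine ⟨?_, ?_, ?_⟩
    · rw [hdef]
      exact le_trans hres1 (le_trans (le_max_left _ _) (le_max_left _ _))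
    · rcases max_choice (max res (gd seq (m + 6) * mx)) (gd seq (m + 6) * mn) with h1 | h1
      · rcases max_choice res (gd seq (m + 6) * mx) with h2 | h2
        · rw [hdef, h1, h2]; exact hres2
        · rw [hdef, h1, h2]
          exact Or.inr (good_of_mem_prefix seq m mx hjlen hmx.1 (Or.inr hy))
      · rw [hdef, h1]
        exact Or.inr (good_of_mem_prefix seq m mn hjlen hmn.1 (Or.inr hy))
    · intro i j hij hjm hjl hc
      rcases (by omega : j < m + 6 ∨ j = m + 6) with hlt | rfl
      · refine le_trans (hres3 i j hij hlt hjl hc) ?_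
        rw [hdef]
        exact le_trans (le_max_left _ _) (le_max_left _ _)
      · have hgi : gd seq i ∈ seq.take (m + 1) := gd_mem_take seq (m + 1) i (by omega) (by omega)
        rw [hdef]
        refine le_trans (mul_le_max_of_between _ _ _ _ (hmn.2 _ hgi) (hmx.2 _ hgi)) ?_
        exact max_le_max (le_max_right _ _) (le_refl _)
  · rw [if_neg hy] at hdef
    cases mxe with
    | none =>
      have hemp : evens (seq.take (m + 1)) = [] := hmxe
      cases mne with
      | some w =>
        have := hmne.1
        rw [hemp] at this
        cases this
      | none =>
        replace hdef : res' = res := hdef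
        refine ⟨by rw [hdef]; exact hres1, by rw [hdef]; exact hres2, ?_⟩
        intro i j hij hjm hjl hc
        rcases (by omega : j < m + 6 ∨ j = m + 6) with hlt | rfl
        · rw [hdef]; exact hres3 i j hij hlt hjl hc
        · have hie : gd seq i % 2 = 0 := by
            rcases hc with h | h
            · exact h
            · exact absurd h hy
          have : gd seq i ∈ evens (seq.take (m + 1)) :=
            (mem_evens _ _).mpr ⟨gd_mem_take seq (m + 1) i (by omega) (by omega), hie⟩
          rw [hemp] at this
          cases this
    | some v =>
      cases mne with
      | none =>
        have hemp : evens (seq.take (m + 1)) = [] := hmne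
        have := hmxe.1
        rw [hemp] at this
        cases this
      | some w =>
        replace hdef : res' = max (max res (gd seq (m + 6) * v)) (gd seq (m + 6) * w) := hdef
        have hv := (mem_evens _ _).mp hmxe.1
        have hw := (mem_evens _ _).mp hmne.1
        refine ⟨?_, ?_, ?_⟩
        · rw [hdef]
          exact le_trans hres1 (le_trans (le_max_left _ _) (le_max_left _ _))
        · rcases max_choice (max res (gd seq (m + 6) * v)) (gd seq (m + 6) * w) with h1 | h1
          · rcases max_choice res (gd seq (m + 6) * v) with h2 | h2
            · rw [hdef, h1, h2]; exact hres2
            · rw [hdef, h1, h2]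
              exact Or.inr (good_of_mem_prefix seq m v hjlen hv.1 (Or.inl hv.2))
          · rw [hdef, h1]
            exact Or.inr (good_of_mem_prefix seq m w hjlen hw.1 (Or.inl hw.2))
        · intro i j hij hjm hjl hc
          rcases (by omega : j < m + 6 ∨ j = m + 6) with hlt | rfl
          · refine le_trans (hres3 i j hij hlt hjl hc) ?_
            rw [hdef]
            exact le_trans (le_max_left _ _) (le_max_left _ _)
          · have hie : gd seq i % 2 = 0 := by
              rcases hc with h | h
              · exact h
              · exact absurd h hy
            have hgi : gd seq i ∈ evens (seq.take (m + 1)) :=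
              (mem_evens _ _).mpr ⟨gd_mem_take seq (m + 1) i (by omega) (by omega), hie⟩
            rw [hdef]
            refine le_trans (mul_le_max_of_between _ _ _ _ (hmne.2 _ hgi) (hmxe.2 _ hgi)) ?_
            exact max_le_max (le_max_right _ _) (le_refl _)

lemma invB_holds (seq : List Int) (m : Nat) (hm : m + 6 ≤ seq.length) : InvB seq m := by
  induction m with
  | zero =>
    refine ⟨rfl, rfl, rfl, rfl, le_refl _, Or.inl rfl, ?_⟩
    intro i j hij hjm _ _
    omega
  | succ m ih =>
    have ihm := ih (by omega)
    have hmlen : m < seq.length := by omega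
    have hjlen : m + 6 < seq.length := by omega
    have hstep : SB seq (m + 1) = stepB seq (SB seq m) m := by
      unfold SB
      rw [List.range_succ, List.foldl_append, List.foldl_cons, List.foldl_nil]
    have htake := take_succ_gd seq m hmlen
    unfold InvB at ihm ⊢
    rcases hSB : SB seq m with ⟨res, mx, mn, mxe, mne⟩
    rw [hSB] at ihm
    obtain ⟨hmx, hmn, hmxe, hmne, hres1, hres2, hres3⟩ := ihm
    rw [hstep, hSB]
    have hmx' := isMaxOf_snoc mx (seq.take m) (gd seq m) hmx
    have hmn' := isMinOf_snoc mn (seq.take m) (gd seq m) hmn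
    rw [← htake] at hmx' hmn'
    by_cases hx : gd seq m % 2 = 0
    · have hmxe' := isMaxOf_snoc mxe (evens (seq.take m)) (gd seq m) hmxe
      have hmne' := isMinOf_snoc mne (evens (seq.take m)) (gd seq m) hmne
      have heq : evens (seq.take (m + 1)) = evens (seq.take m) ++ [gd seq m] := by
        rw [htake, evens_snoc, if_pos hx]
      rw [← heq] at hmxe' hmne'
      have hr := res_update seq m hjlen res hres1 hres2 hres3 _ _ hmx' hmn' _ _ hmxe' hmne' _ rfl
      exact ⟨hmx', hmn', by simp only [stepB, if_pos hx]; exact hmxe',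
        by simp only [stepB, if_pos hx]; exact hmne',
        by simpa only [stepB, if_pos hx] using hr.1,
        by simpa only [stepB, if_pos hx] using hr.2.1,
        by simpa only [stepB, if_pos hx] using hr.2.2⟩
    · have heq : evens (seq.take (m + 1)) = evens (seq.take m) := by
        rw [htake, evens_snoc, if_neg hx]
      rw [← heq] at hmxe hmne
      have hr := res_update seq m hjlen res hres1 hres2 hres3 _ _ hmx' hmn' _ _ hmxe hmne _ rfl
      exact ⟨hmx', hmn', by simp only [stepB, if_neg hx]; exact hmxe,
        by simp only [stepB, if_neg hx]; exact hmne,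
        by simpa only [stepB, if_neg hx] using hr.1,
        by simpa only [stepB, if_neg hx] using hr.2.1,
        by simpa only [stepB, if_neg hx] using hr.2.2⟩

-- B's loop body exactly as in the port
def stepBI (seq : List Int) (st : StB) (j : Int) : StB :=
  let x := PySem.List.pyGetD seq (j - 6) 0
  let mx : Int := match st.2.1 with | none => x | some v => max v x
  let mn : Int := match st.2.2.1 with | none => x | some v => min v x
  let mxe : Option Int :=
    if PySem.Int.mod x 2 = 0 then
      some (match st.2.2.2.1 with | none => x | some v => max v x)
    else st.2.2.2.1
  let mne : Option Int :=
    if PySem.Int.mod x 2 = 0 then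
      some (match st.2.2.2.2 with | none => x | some v => min v x)
    else st.2.2.2.2
  let y := PySem.List.pyGetD seq j 0
  let result : Int :=
    if PySem.Int.mod y 2 = 0 then max (max st.1 (y * mx)) (y * mn)
    else match mxe, mne with
      | some v, some w => max (max st.1 (y * v)) (y * w)
      | _, _ => st.1
  (result, some mx, some mn, mxe, mne)

lemma flm_alt_eq_stepBI (seq : List Int) :
    flm_alt seq = ((PySem.List.pyRange 6 (seq.length : Int) 1).foldl (stepBI seq)
      ((-1 : Int), none, none, none, none)).1 := rfl

lemma stepBI_eq_stepB (seq : List Int) (st : StB) (k : Nat) :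
    stepBI seq st ((6 : Int) + (k : Int)) = stepB seq st k := by
  have hx : (6 : Int) + (k : Int) - 6 = ((k : Nat) : Int) := by omega
  have hy : (6 : Int) + (k : Int) = (((k + 6 : Nat)) : Int) := by push_cast; omega
  unfold stepBI stepB
  rw [hx, hy, PySem.List.pyGetD_natCast, PySem.List.pyGetD_natCast]
  simp only [pymod2, gd]

lemma flm_alt_eq_SB (seq : List Int) : flm_alt seq = (SB seq (seq.length - 6)).1 := by
  rw [flm_alt_eq_stepBI, SB]
  congr 1
  rw [PySem.List.pyRange_one]
  have hn : ((seq.length : Int) - 6).toNat = seq.length - 6 := by omega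
  rw [hn, List.foldl_map]
  apply PySem.List.foldl_congr_mem
  exact fun st k _ => stepBI_eq_stepB seq st k

lemma flm_alt_charAll (seq : List Int) : CharAll seq (flm_alt seq) := by
  rw [flm_alt_eq_SB]
  by_cases h6 : 6 ≤ seq.length
  · obtain ⟨_, _, _, _, h1, h2, h3⟩ := invB_holds seq (seq.length - 6) (by omega)
    refine ⟨h1, h2, ?_⟩
    rintro p ⟨i, j, hij, hjn, hc, rfl⟩
    exact h3 i j hij (by omega) hjn hc
  · have h0 : seq.length - 6 = 0 := by omega
    rw [h0]
    refine ⟨le_refl _, Or.inl rfl, ?_⟩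
    rintro p ⟨i, j, hij, hjn, _, rfl⟩
    omega

-- ===== VERDICT (by name: the statement is the Claim_ definition above) =====
theorem flm_spec : Claim_equal_flm := by
  intro seq _
  unfold Spec_flm
  exact charAll_unique seq _ _ (flm_charAll seq) (flm_alt_charAll seq)
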